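-- pv_equiv track=rewrite | github.com/zhasny17/msRestaurante | util/utilitarios.py | RetornaParametro
-- ===== SOURCE A (Python) =====
-- def RetornaParametro(listaParametros, param ):
--     retorno = ''
--     for parametro in listaParametros:
--         if parametro.find(param)>-1:
--             vRetorno = parametro.split('=')
--             if len(vRetorno)==2:
--                 retorno = vRetorno[1]
--     return retorno
-- ===== SOURCE B (Python) =====
-- def RetornaParametro(listaParametros, param):
--     for parametro in reversed(listaParametros):
--         if parametro.find(param) > -1:
--             vRetorno = parametro.split('=')
--             if len(vRetorno) == 2:
--                 return vRetorno[1]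
--     return ''
-- ===== Notes on version B (the rewrite author's own statement) =====
-- stated objective: alternative
-- what changed: Replaces the forward accumulate-the-last-match loop with a reverse traversal that returns the first match from the end immediately.
import Mathlib
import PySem

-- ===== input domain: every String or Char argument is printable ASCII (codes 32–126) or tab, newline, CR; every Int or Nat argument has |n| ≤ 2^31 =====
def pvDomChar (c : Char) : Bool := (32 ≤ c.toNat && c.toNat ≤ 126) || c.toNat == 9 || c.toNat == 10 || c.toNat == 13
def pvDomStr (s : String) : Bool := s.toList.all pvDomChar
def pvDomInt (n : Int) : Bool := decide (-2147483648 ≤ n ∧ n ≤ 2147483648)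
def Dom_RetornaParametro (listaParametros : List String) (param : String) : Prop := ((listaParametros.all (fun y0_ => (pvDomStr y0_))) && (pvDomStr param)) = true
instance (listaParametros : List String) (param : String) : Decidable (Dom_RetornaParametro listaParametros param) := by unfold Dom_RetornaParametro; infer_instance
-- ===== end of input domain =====

-- B traverses the list in reverse and returns the first matching "k=v" value immediately (same result as A's last-match accumulator); alternative decomposition, not faster.


-- ===== PORT A =====
def RetornaParametro (listaParametros : List String) (param : String) : String :=
  listaParametros.foldl
    (fun retorno parametro =>
      if PySem.Str.find parametro param > -1 then
        let vRetorno := (PySem.Str.split? parametro "=").getD []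
        if vRetorno.length = 2 then (PySem.List.pyGet? vRetorno 1).getD "" else retorno
      else retorno)
    ""

-- ===== PORT B =====
-- reverse traversal with early return: first match from the end
def altGo (rl : List String) (param : String) : String :=
  match rl with
  | [] => ""
  | parametro :: rest =>
      if PySem.Str.find parametro param > -1 then
        let vRetorno := (PySem.Str.split? parametro "=").getD []
        if vRetorno.length = 2 then (PySem.List.pyGet? vRetorno 1).getD "" else altGo rest param
      else altGo rest param

def RetornaParametro_alt (listaParametros : List String) (param : String) : String :=
  altGo listaParametros.reverse param

-- ===== PRECONDITION & SPEC =====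
def Spec_RetornaParametro (listaParametros : List String) (param : String) (out : String) : Prop := out = RetornaParametro_alt listaParametros param
instance (listaParametros : List String) (param : String) (out : String) : Decidable (Spec_RetornaParametro listaParametros param out) := by unfold Spec_RetornaParametro; infer_instance

-- ===== CLAIM (what is proved, stated in full; the proofs are below) =====
def Claim_equal_RetornaParametro : Prop := ∀ (listaParametros : List String) (param : String), Dom_RetornaParametro listaParametros param → Spec_RetornaParametro listaParametros param (RetornaParametro listaParametros param)

-- ===== LEMMAS AND PROOFS =====

-- altGo with an explicit accumulator, for the foldl correspondence
def altGoA (acc : String) (rl : List String) (param : String) : String :=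
  match rl with
  | [] => acc
  | parametro :: rest =>
      if PySem.Str.find parametro param > -1 then
        let vRetorno := (PySem.Str.split? parametro "=").getD []
        if vRetorno.length = 2 then (PySem.List.pyGet? vRetorno 1).getD "" else altGoA acc rest param
      else altGoA acc rest param

theorem foldl_eq_altGoA (param : String) (l : List String) (acc : String) :
    l.foldl
      (fun retorno parametro =>
        if PySem.Str.find parametro param > -1 then
          let vRetorno := (PySem.Str.split? parametro "=").getD []
          if vRetorno.length = 2 then (PySem.List.pyGet? vRetorno 1).getD "" else retorno
        else retorno)
      acc = altGoA acc l.reverse param := by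
  induction l using List.reverseRecOn generalizing acc with
  | nil => simp [altGoA]
  | append_singleton l x ih =>
      rw [List.foldl_append, List.reverse_append]
      simp only [List.foldl_cons, List.foldl_nil, List.reverse_singleton, List.singleton_append,
        altGoA]
      split_ifs with h1 h2 <;> first | rfl | exact ih acc

theorem altGoA_empty (param : String) (rl : List String) : altGoA "" rl param = altGo rl param := by
  induction rl with
  | nil => rfl
  | cons x rest ih => simp only [altGoA, altGo, ih]

-- ===== VERDICT (by name: the statement is the Claim_ definition above) =====
theorem RetornaParametro_spec : Claim_equal_RetornaParametro := by
  intro l p _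
  show RetornaParametro l p = RetornaParametro_alt l p
  unfold RetornaParametro RetornaParametro_alt
  rw [foldl_eq_altGoA, altGoA_empty]
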